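-- pv_equiv track=rewrite | github.com/Artkongar/Generator | Generator_iter2.py | __wrapContentForHtml
-- ===== SOURCE A (Python) =====
-- def __wrapContentForHtml(content):
--     newContent = ""
--     isOpen = False
--     for word in content:
--         if (word == "$"):
--             if (isOpen == False):
--                 newContent += "\("
--                 isOpen = True
--             else:
--                 newContent += "\)"
--                 isOpen = False
--         else:
--             newContent += word
--     return newContent
-- ===== SOURCE B (Python) =====
-- def __wrapContentForHtml(content):
--     pieces = content.split("$")
--     parts = [pieces[0]]
--     for i in range(1, len(pieces)):
--         parts.append("\\(" if i % 2 == 1 else "\\)")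
--         parts.append(pieces[i])
--     return "".join(parts)
-- ===== Notes on version B (the rewrite author's own statement) =====
-- stated objective: faster
-- what changed: B splits the string on the delimiter once and joins the segments with alternating delimiters, instead of scanning character by character with an isOpen toggle and per-character string concatenation.
import Mathlib
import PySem

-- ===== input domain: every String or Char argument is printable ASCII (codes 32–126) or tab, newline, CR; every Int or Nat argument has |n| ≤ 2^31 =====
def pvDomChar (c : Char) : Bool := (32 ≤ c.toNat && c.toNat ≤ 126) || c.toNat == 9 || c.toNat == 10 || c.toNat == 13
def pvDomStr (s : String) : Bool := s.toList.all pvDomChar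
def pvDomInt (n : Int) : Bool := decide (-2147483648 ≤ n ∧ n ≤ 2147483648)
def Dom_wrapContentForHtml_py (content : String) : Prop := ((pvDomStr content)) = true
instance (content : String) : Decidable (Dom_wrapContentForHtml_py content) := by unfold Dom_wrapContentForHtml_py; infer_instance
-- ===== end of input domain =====

-- B splits on '$' once and joins segments with alternating delimiters instead of A's
-- per-character scan with an isOpen toggle; objective: simpler decomposition, same result.

-- ===== PORT A =====
-- character loop with (newContent, isOpen) state, exactly A's branches
def wrapStepA (st : List Char × Bool) (word : Char) : List Char × Bool :=
  if word = '$' then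
    if st.2 = false then (st.1 ++ ['\\', '('], true)
    else (st.1 ++ ['\\', ')'], false)
  else (st.1 ++ [word], st.2)

def wrapContentForHtml_py (content : String) : String :=
  String.ofList (content.toList.foldl wrapStepA ([], false)).1

-- ===== PORT B =====
-- later pieces, each preceded by "\(" (odd position, b = true) or "\)" (even, b = false)
def altGlue (b : Bool) : List (List Char) → List Char
  | [] => []
  | p :: ps => (if b then ['\\', '('] else ['\\', ')']) ++ p ++ altGlue (!b) ps

def wrapContentForHtml_py_alt (content : String) : String :=
  match content.toList.splitOn '$' with
  | [] => ""            -- unreachable: splitOn never returns []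
  | h :: t => String.ofList (h ++ altGlue true t)

-- ===== PRECONDITION & SPEC =====
def Spec_wrapContentForHtml_py (content : String) (out : String) : Prop := out = wrapContentForHtml_py_alt content
instance (content : String) (out : String) : Decidable (Spec_wrapContentForHtml_py content out) := by unfold Spec_wrapContentForHtml_py; infer_instance

-- ===== CLAIM (what is proved, stated in full; the proofs are below) =====
def Claim_equal_wrapContentForHtml_py : Prop := ∀ (content : String), Dom_wrapContentForHtml_py content → Spec_wrapContentForHtml_py content (wrapContentForHtml_py content)

-- ===== LEMMAS AND PROOFS =====

-- value of A's result glued from the pieces, starting from isOpen state b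
def glueFrom (b : Bool) : List (List Char) → List Char
  | [] => []
  | h :: t => h ++ altGlue (!b) t

theorem splitOn_cons_dollar (cs : List Char) :
    ('$' :: cs).splitOn '$' = [] :: cs.splitOn '$' := by
  simp [List.splitOn, List.splitOnP_cons]

theorem splitOn_cons_other {c : Char} (hc : c ≠ '$') (cs : List Char) :
    (c :: cs).splitOn '$' = (cs.splitOn '$').modifyHead (c :: ·) := by
  have hbeq : (c == '$') = false := by simpa using hc
  simp [List.splitOn, List.splitOnP_cons, hbeq]

theorem wrap_loop (cs : List Char) (b : Bool) (acc : List Char) :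
    (cs.foldl wrapStepA (acc, b)).1 = acc ++ glueFrom b (cs.splitOn '$') := by
  induction cs generalizing b acc with
  | nil => simp [List.splitOn, glueFrom, altGlue]
  | cons c cs ih =>
    by_cases hc : c = '$'
    · subst hc
      have hne : cs.splitOn '$' ≠ [] := List.splitOnP_ne_nil _ _
      obtain ⟨h', t', hs⟩ := List.exists_cons_of_ne_nil hne
      cases b with
      | false =>
        have hstep : wrapStepA (acc, false) '$' = (acc ++ ['\\', '('], true) := by
          simp [wrapStepA]
        rw [List.foldl_cons, hstep, ih, splitOn_cons_dollar, hs]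
        simp [glueFrom, altGlue]
      | true =>
        have hstep : wrapStepA (acc, true) '$' = (acc ++ ['\\', ')'], false) := by
          simp [wrapStepA]
        rw [List.foldl_cons, hstep, ih, splitOn_cons_dollar, hs]
        simp [glueFrom, altGlue]
    · have hne : cs.splitOn '$' ≠ [] := List.splitOnP_ne_nil _ _
      obtain ⟨h', t', hs⟩ := List.exists_cons_of_ne_nil hne
      have hstep : wrapStepA (acc, b) c = (acc ++ [c], b) := by
        simp [wrapStepA, hc]
      rw [List.foldl_cons, hstep, ih, splitOn_cons_other hc, hs]
      simp [glueFrom]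

-- ===== VERDICT (by name: the statement is the Claim_ definition above) =====
theorem wrapContentForHtml_py_spec : Claim_equal_wrapContentForHtml_py := by
  intro content _
  unfold Spec_wrapContentForHtml_py wrapContentForHtml_py wrapContentForHtml_py_alt
  have hne : content.toList.splitOn '$' ≠ [] := List.splitOnP_ne_nil _ _
  obtain ⟨h, t, hs⟩ := List.exists_cons_of_ne_nil hne
  rw [wrap_loop, hs]
  simp [glueFrom]
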